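-- pv_equiv track=rewrite | github.com/rushika-16/Rushika_App | backend/guardrails.py | enforce_non_promissory_language
-- ===== SOURCE A (Python) =====
-- def enforce_non_promissory_language(text: str) -> str:
--     if not text:
--         return text
--
--     replacements = {
--         "approved": "pre-qualified",
--         "Approved": "Pre-qualified",
--         "guaranteed": "subject to verification",
--         "Guaranteed": "Subject to verification",
--         "confirmed": "pending final review",
--         "Confirmed": "Pending final review",
--     }
--
--     updated = text
--     for source, target in replacements.items():
--         updated = updated.replace(source, target)
--     return updated
-- ===== SOURCE B (Python) =====
-- def enforce_non_promissory_language(text: str) -> str: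
--     # Single left-to-right pass: at each position emit the replacement for the
--     # first matching source word (sources never overlap), else copy the char.
--     if not text:
--         return text
--
--     rules = (
--         ("approved", "pre-qualified"),
--         ("Approved", "Pre-qualified"),
--         ("guaranteed", "subject to verification"),
--         ("Guaranteed", "Subject to verification"),
--         ("confirmed", "pending final review"),
--         ("Confirmed", "Pending final review"),
--     )
--
--     out = []
--     i = 0
--     n = len(text)
--     while i < n:
--         for source, target in rules:
--             if text.startswith(source, i):
--                 out.append(target)
--                 i += len(source)
--                 break
--         else:
--             out.append(text[i])
--             i += 1
--     return "".join(out)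
-- ===== Notes on version B (the rewrite author's own statement) =====
-- stated objective: alternative
-- what changed: Replaces six sequential full-string str.replace passes with a single left-to-right scan that, at each position, emits the replacement of the first matching source word or copies the character.
import Mathlib
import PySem

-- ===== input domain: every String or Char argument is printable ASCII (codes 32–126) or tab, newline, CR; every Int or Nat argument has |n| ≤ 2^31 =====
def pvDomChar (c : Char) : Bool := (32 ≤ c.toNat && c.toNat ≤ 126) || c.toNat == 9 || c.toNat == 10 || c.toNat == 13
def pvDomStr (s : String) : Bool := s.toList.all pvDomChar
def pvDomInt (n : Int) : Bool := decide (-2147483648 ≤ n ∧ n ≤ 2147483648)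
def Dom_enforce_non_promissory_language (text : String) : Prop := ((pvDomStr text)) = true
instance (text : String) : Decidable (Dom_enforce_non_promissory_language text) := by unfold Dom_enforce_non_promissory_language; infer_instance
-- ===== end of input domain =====

-- B replaces A's six sequential full-string `str.replace` passes by one left-to-right
-- scan emitting the replacement of the first matching source word (objective: alternative,
-- same cost); both are proved to return the same string on every input.

-- ===== PORT A =====
def enforce_non_promissory_language (text : String) : String :=
  if text = "" then text
  else
    -- the dict literal, in insertion order
    let replacements : PySem.Dict String String := PySem.Dict.ofList
      [("approved", "pre-qualified"), ("Approved", "Pre-qualified"),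
       ("guaranteed", "subject to verification"), ("Guaranteed", "Subject to verification"),
       ("confirmed", "pending final review"), ("Confirmed", "Pending final review")]
    -- for source, target in replacements.items(): updated = updated.replace(source, target)
    replacements.items.foldl (fun updated kv => PySem.Str.replace updated kv.1 kv.2) text

-- ===== PORT B =====
-- Source B's `rules` tuple of (source, target) pairs, over char lists
def pvTable : List (List Char × List Char) :=
  [("approved".toList, "pre-qualified".toList), ("Approved".toList, "Pre-qualified".toList),
   ("guaranteed".toList, "subject to verification".toList), ("Guaranteed".toList, "Subject to verification".toList),
   ("confirmed".toList, "pending final review".toList), ("Confirmed".toList, "Pending final review".toList)]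

-- Source B's inner `for source, target in rules: if text.startswith(source, i)`:
-- first table entry whose source is a prefix of the remaining text
def pvFindKey (l : List Char) : List (List Char × List Char) → Option (List Char × List Char)
  | [] => none
  | (k, t) :: rest => if k.isPrefixOf l then some (k, t) else pvFindKey l rest

-- termination helper for the scan (cited by the port's decreasing_by)
theorem pvFindKey_pos {l : List Char} {tbl : List (List Char × List Char)}
    {k t : List Char} (h : pvFindKey l tbl = some (k, t))
    (hp : ∀ p ∈ tbl, 0 < p.1.length) : 0 < k.length := by
  induction tbl with
  | nil => simp [pvFindKey] at h
  | cons p rest ih =>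
      obtain ⟨k', t'⟩ := p
      by_cases hpre : k'.isPrefixOf l
      · simp [pvFindKey, hpre] at h
        exact h.1 ▸ hp _ (List.mem_cons_self ..)
      · simp [pvFindKey, hpre] at h
        exact ih h (fun p hp' => hp _ (List.mem_cons_of_mem _ hp'))

-- Source B's while loop: one pass over the characters, emitting target / the char
def pvScan : List Char → List Char
  | [] => []
  | c :: t =>
    match h : pvFindKey (c :: t) pvTable with
    | some (k, tgt) => tgt ++ pvScan (List.drop k.length (c :: t))
    | none => c :: pvScan t
termination_by l => l.length
decreasing_by
  · have hk : 0 < k.length := pvFindKey_pos h (by decide)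
    simp; omega
  · simp

def enforce_non_promissory_language_alt (text : String) : String :=
  if text = "" then text
  else String.ofList (pvScan text.toList)  -- "".join(out)

-- ===== PRECONDITION & SPEC =====
def Spec_enforce_non_promissory_language (text : String) (out : String) : Prop := out = enforce_non_promissory_language_alt text
instance (text : String) (out : String) : Decidable (Spec_enforce_non_promissory_language text out) := by unfold Spec_enforce_non_promissory_language; infer_instance

-- ===== CLAIM (what is proved, stated in full; the proofs are below) =====
def Claim_equal_enforce_non_promissory_language : Prop := ∀ (text : String), Dom_enforce_non_promissory_language text → Spec_enforce_non_promissory_language text (enforce_non_promissory_language text)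

-- ===== LEMMAS AND PROOFS =====

-- fuel-indexed structural form of CPython str.replace's scan (fuel 0 returns the rest)
def pvRepl (old new : List Char) : Nat → List Char → List Char
  | 0, l => l
  | _ + 1, [] => []
  | f + 1, c :: t =>
    if old.isPrefixOf (c :: t) then new ++ pvRepl old new f (List.drop old.length (c :: t))
    else c :: pvRepl old new f t

theorem pvGo_eq (old new : List Char) :
    ∀ (f : Nat) (l acc : List Char),
      PySem.Chars.replace.go old new f l acc = acc.reverse ++ pvRepl old new f l := by
  intro f
  induction f with
  | zero => intro l acc; rfl
  | succ f ih =>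
      intro l acc
      cases l with
      | nil => simp [pvRepl]; rfl
      | cons c t =>
          show (if old.isPrefixOf (c :: t) then
                  PySem.Chars.replace.go old new f (List.drop old.length (c :: t)) (new.reverse ++ acc)
                else PySem.Chars.replace.go old new f t (c :: acc)) = _
          by_cases hp : old.isPrefixOf (c :: t) <;> simp [hp, pvRepl, ih]

theorem pvReplace_eq (s old new : List Char) (h : old ≠ []) :
    PySem.Chars.replace s old new = pvRepl old new s.length s := by
  have : old.isEmpty = false := by cases old <;> simp_all
  simp [PySem.Chars.replace, this, pvGo_eq]

theorem pvRepl_irrel (old new : List Char) (hold : old ≠ []) :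
    ∀ (f1 : Nat) (l : List Char) (f2 : Nat), l.length ≤ f1 → l.length ≤ f2 →
      pvRepl old new f1 l = pvRepl old new f2 l := by
  intro f1
  induction f1 with
  | zero =>
      intro l f2 h1 _
      have hl : l = [] := List.length_eq_zero_iff.mp (Nat.le_zero.mp h1)
      subst hl; cases f2 <;> rfl
  | succ f ih =>
      intro l f2 h1 h2
      cases l with
      | nil => cases f2 <;> rfl
      | cons c t =>
          cases f2 with
          | zero => simp at h2
          | succ f2' =>
              simp only [pvRepl]
              by_cases hp : old.isPrefixOf (c :: t)
              · simp only [hp, if_pos]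
                have hlen : (List.drop old.length (c :: t)).length ≤ f := by
                  have : 0 < old.length := by cases old <;> simp_all
                  simp at h1 ⊢; omega
                have hlen2 : (List.drop old.length (c :: t)).length ≤ f2' := by
                  have : 0 < old.length := by cases old <;> simp_all
                  simp at h2 ⊢; omega
                rw [ih _ _ hlen hlen2]
              · simp only [hp, if_neg, Bool.false_eq_true, not_false_iff]
                have := ih t f2' (by simpa using Nat.lt_succ_iff.mp (by simpa using h1)) (by simpa using Nat.lt_succ_iff.mp (by simpa using h2))
                simp [this]

-- "pat never starts inside block": every nonempty suffix of block is prefix-incompatible with pat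
def pvQ (pat block : List Char) : Bool :=
  block.tails.all fun s => s.isEmpty || (!pat.isPrefixOf s && !s.isPrefixOf pat)

theorem pvQ_spec {pat block s : List Char} (h : pvQ pat block = true)
    (hs : s <:+ block) (hne : s ≠ []) : ¬ (pat <+: s) ∧ ¬ (s <+: pat) := by
  have := (List.all_eq_true.mp h) s ((List.mem_tails s block).mpr hs)
  cases s with
  | nil => exact absurd rfl hne
  | cons c t =>
      simp only [List.isEmpty_cons, Bool.false_or, Bool.and_eq_true, Bool.not_eq_true'] at this
      exact ⟨fun hc => by simp [List.isPrefixOf_iff_prefix.mpr hc] at this,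
             fun hc => by simp [List.isPrefixOf_iff_prefix.mpr hc] at this⟩

theorem pvPrefix_append_cases {pat s y : List Char} (h : pat <+: s ++ y) :
    pat <+: s ∨ s <+: pat :=
  List.prefix_or_prefix_of_prefix h (List.prefix_append s y)

-- SAFE: a block pat never starts inside passes through pvRepl untouched
theorem pvRepl_append (pat new : List Char) :
    ∀ (S : List Char), pvQ pat S = true → ∀ (y : List Char) (f : Nat), S.length ≤ f →
      pvRepl pat new f (S ++ y) = S ++ pvRepl pat new (f - S.length) y := by
  intro S
  induction S with
  | nil => intro _ y f _; simp
  | cons c S' ih =>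
      intro hQ y f hf
      cases f with
      | zero => simp at hf
      | succ f' =>
          have hnm : ¬ (pat <+: c :: (S' ++ y)) := by
            intro hp
            rcases pvPrefix_append_cases (show pat <+: (c :: S') ++ y from hp) with h | h
            · exact (pvQ_spec hQ (List.suffix_refl _) (by simp)).1 h
            · exact (pvQ_spec hQ (List.suffix_refl _) (by simp)).2 h
          have hQ' : pvQ pat S' = true := by
            apply List.all_eq_true.mpr
            intro s hs
            exact (List.all_eq_true.mp hQ) s ((List.mem_tails _ _).mpr
              ((List.mem_tails s S').mp hs |>.trans (List.suffix_cons c S')))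
          show pvRepl pat new (f' + 1) (c :: (S' ++ y)) = _
          rw [show pvRepl pat new (f' + 1) (c :: (S' ++ y)) = c :: pvRepl pat new f' (S' ++ y) from by
                simp [pvRepl, hnm]]
          rw [ih hQ' y f' (by simpa using Nat.lt_succ_iff.mp (by simpa using hf))]
          simp

-- REFLECT: a prefix incompatible with the emitted replacement survives pvRepl backwards
theorem pvRepl_reflect (old new p : List Char) (hQ : pvQ new p = true) :
    ∀ (f : Nat) (X s : List Char), s <:+ p → s <+: pvRepl old new f X → s <+: X := by
  intro f
  induction f with
  | zero => intro X s _ h; exact h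
  | succ f ih =>
      intro X s hsp h
      cases X with
      | nil =>
          cases s with
          | nil => exact List.nil_prefix
          | cons d s' => simp [pvRepl] at h
      | cons c t =>
          simp only [pvRepl] at h
          by_cases hp : old.isPrefixOf (c :: t)
          · simp only [hp, if_pos] at h
            cases s with
            | nil => exact List.nil_prefix
            | cons d s' =>
                rcases pvPrefix_append_cases h with h' | h'
                · exact absurd h' (pvQ_spec hQ hsp (by simp)).2
                · exact absurd h' (pvQ_spec hQ hsp (by simp)).1
          · simp only [hp, Bool.false_eq_true, if_neg, not_false_iff] at h
            cases s with
            | nil => exact List.nil_prefix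
            | cons d s' =>
                rw [List.cons_prefix_cons] at h ⊢
                exact ⟨h.1, ih t s' ((List.suffix_cons d s').trans hsp) h.2⟩

-- A's six sequential replaces as a fold over the table, with exact fuels
def pvChainF : List (List Char × List Char) → List Char → List Char
  | [], l => l
  | (k, t) :: rest, l => pvChainF rest (pvRepl k t l.length l)

-- concrete fact about the table, checked by the kernel
theorem pvFact_tails : ∀ p ∈ pvTable, ∀ q ∈ pvTable, pvQ q.2 p.1.tail = true := by decide

-- findKey specs
theorem pvFindKey_none_iff {l : List Char} {tbl : List (List Char × List Char)} :
    pvFindKey l tbl = none ↔ ∀ p ∈ tbl, ¬ (p.1 <+: l) := by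
  induction tbl with
  | nil => simp [pvFindKey]
  | cons p rest ih =>
      obtain ⟨k, t⟩ := p
      by_cases hp : k.isPrefixOf l
      · simp [pvFindKey, hp, List.isPrefixOf_iff_prefix.mp hp]
      · simp only [pvFindKey, hp, Bool.false_eq_true, if_neg, not_false_iff, ih, List.mem_cons]
        constructor
        · rintro h q (rfl | hq)
          · simpa using fun hc => hp (List.isPrefixOf_iff_prefix.mpr hc)
          · exact h q hq
        · intro h q hq; exact h q (Or.inr hq)

-- "no source matches at the head" is preserved by one replace pass
theorem pvHead_no_preserved {c : Char} {Y k t : List Char} (hkt : (k, t) ∈ pvTable)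
    {p : List Char × List Char} (hp : p ∈ pvTable) (hno : ¬ (p.1 <+: c :: Y)) (f : Nat) :
    ¬ (p.1 <+: c :: pvRepl k t f Y) := by
  intro hc
  cases hps : p.1 with
  | nil => exact hno (by simp [hps])
  | cons d ps =>
      rw [hps, List.cons_prefix_cons] at hc
      have hQ : pvQ t ps = true := by
        have := pvFact_tails p hp (k, t) hkt
        rwa [hps] at this
      have := pvRepl_reflect k t ps hQ f Y ps (List.suffix_refl _) hc.2
      exact hno (by rw [hps, List.cons_prefix_cons]; exact ⟨hc.1, this⟩)

-- CASE B: no source matches at the head — the head character passes through the chain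
theorem pvChainF_no : ∀ (tbl : List (List Char × List Char)), (∀ p ∈ tbl, p ∈ pvTable) →
    ∀ (c : Char) (Y : List Char), (∀ p ∈ pvTable, ¬ (p.1 <+: c :: Y)) →
      pvChainF tbl (c :: Y) = c :: pvChainF tbl Y := by
  intro tbl
  induction tbl with
  | nil => intro _ c Y _; rfl
  | cons q rest ih =>
      intro hsub c Y hno
      obtain ⟨k, t⟩ := q
      have hmem : (k, t) ∈ pvTable := hsub _ (List.mem_cons_self ..)
      have hnm : ¬ (k <+: c :: Y) := hno (k, t) hmem
      show pvChainF rest (pvRepl k t (c :: Y).length (c :: Y)) = _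
      have hstep : pvRepl k t (c :: Y).length (c :: Y) = c :: pvRepl k t Y.length Y := by
        simp only [List.length_cons, pvRepl]
        rw [if_neg (fun hb => hnm (List.isPrefixOf_iff_prefix.mp hb))]
      rw [hstep, ih (fun p hp => hsub p (List.mem_cons_of_mem _ hp)) c _
        (fun p hp => pvHead_no_preserved hmem hp (hno p hp) _)]
      rfl

theorem pvChainF_append (t1 t2 : List (List Char × List Char)) :
    ∀ l, pvChainF (t1 ++ t2) l = pvChainF t2 (pvChainF t1 l) := by
  induction t1 with
  | nil => intro l; rfl
  | cons q rest ih => obtain ⟨k, t⟩ := q; intro l; exact ih _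

-- a block no listed source starts inside passes through a chain of replaces
theorem pvChainF_block : ∀ (tbl : List (List Char × List Char)) (S : List Char),
    (∀ p ∈ tbl, pvQ p.1 S = true) → ∀ (Y : List Char),
      pvChainF tbl (S ++ Y) = S ++ pvChainF tbl Y := by
  intro tbl
  induction tbl with
  | nil => intro S _ Y; rfl
  | cons q rest ih =>
      intro S hQ Y
      obtain ⟨k, t⟩ := q
      show pvChainF rest (pvRepl k t (S ++ Y).length (S ++ Y)) = _
      rw [List.length_append, pvRepl_append k t S (hQ (k, t) (List.mem_cons_self ..)) Y _ (by omega)]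
      have : S.length + Y.length - S.length = Y.length := by omega
      rw [this, ih S (fun p hp => hQ p (List.mem_cons_of_mem _ hp))]
      rfl

theorem pvRepl_match (k t Z : List Char) (hk : k ≠ []) :
    pvRepl k t (k ++ Z).length (k ++ Z) = t ++ pvRepl k t Z.length Z := by
  cases k with
  | nil => exact absurd rfl hk
  | cons d k' =>
      have hpre : (d :: k').isPrefixOf (d :: k' ++ Z) = true :=
        List.isPrefixOf_iff_prefix.mpr (List.prefix_append _ _)
      show pvRepl (d :: k') t ((k' ++ Z).length + 1) (d :: (k' ++ Z)) = _
      simp only [pvRepl]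
      rw [if_pos (show (d :: k').isPrefixOf (d :: (k' ++ Z)) = true from hpre)]
      rw [show List.drop (d :: k').length (d :: (k' ++ Z)) = Z from List.drop_left (l₁ := d :: k'),
        pvRepl_irrel (d :: k') t (by simp) _ Z Z.length (by simp) (le_refl _)]

-- CASE A: the matched source is consumed, its target emitted, and the chain continues on the rest
theorem pvChainF_match (pre post : List (List Char × List Char)) (k t rest : List Char)
    (hk : k ≠ []) (hQpre : ∀ p ∈ pre, pvQ p.1 k = true) (hQpost : ∀ p ∈ post, pvQ p.1 t = true) :
    pvChainF (pre ++ (k, t) :: post) (k ++ rest) = t ++ pvChainF (pre ++ (k, t) :: post) rest := by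
  rw [pvChainF_append, pvChainF_append, pvChainF_block pre k hQpre rest]
  show pvChainF post (pvRepl k t (k ++ pvChainF pre rest).length (k ++ pvChainF pre rest)) =
    t ++ pvChainF post (pvRepl k t (pvChainF pre rest).length (pvChainF pre rest))
  rw [pvRepl_match k t _ hk, pvChainF_block post t hQpost]

-- unfolding equations for the scan
theorem pvScan_nil : pvScan [] = [] := by rw [pvScan]

theorem pvScan_cons_some {c : Char} {t k tgt : List Char}
    (h : pvFindKey (c :: t) pvTable = some (k, tgt)) :
    pvScan (c :: t) = tgt ++ pvScan (List.drop k.length (c :: t)) := by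
  rw [pvScan]; split <;> simp_all

theorem pvScan_cons_none {c : Char} {t : List Char}
    (h : pvFindKey (c :: t) pvTable = none) :
    pvScan (c :: t) = c :: pvScan t := by
  rw [pvScan]; split <;> simp_all

-- one matched branch: chain consumes the source and emits the target, scan continues
theorem pvBranchChain (pre post : List (List Char × List Char)) (k t l : List Char)
    (htbl : pvTable = pre ++ (k, t) :: post) (hk : k ≠ [])
    (hQpre : ∀ p ∈ pre, pvQ p.1 k = true) (hQpost : ∀ p ∈ post, pvQ p.1 t = true)
    (hpre : k <+: l) :
    pvChainF pvTable l = t ++ pvChainF pvTable (List.drop k.length l) := by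
  have hl : k ++ List.drop k.length l = l := List.prefix_iff_eq_append.mp hpre
  conv_lhs => rw [htbl, ← hl]
  rw [pvChainF_match pre post k t _ hk hQpre hQpost, ← htbl]

theorem pvBranchAll (n : Nat) (ih : ∀ l, l.length ≤ n → pvChainF pvTable l = pvScan l)
    (pre post : List (List Char × List Char)) (k t : List Char) (c : Char) (l' : List Char)
    (htbl : pvTable = pre ++ (k, t) :: post) (hk : k ≠ [])
    (hQpre : ∀ p ∈ pre, pvQ p.1 k = true) (hQpost : ∀ p ∈ post, pvQ p.1 t = true)
    (hln : l'.length ≤ n) (hpre : k <+: c :: l') :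
    pvChainF pvTable (c :: l') = t ++ pvScan (List.drop k.length (c :: l')) := by
  rw [pvBranchChain pre post k t _ htbl hk hQpre hQpost hpre]
  rw [ih _ (by cases k with | nil => exact absurd rfl hk | cons d k' => simp; omega)]

-- MAIN: A's chain of replaces equals B's single scan
theorem pvMain : ∀ (n : Nat) (l : List Char), l.length ≤ n → pvChainF pvTable l = pvScan l := by
  intro n
  induction n with
  | zero =>
      intro l hl
      rw [List.length_eq_zero_iff.mp (Nat.le_zero.mp hl), pvScan_nil]
      rfl
  | succ n ih =>
      intro l hl
      have hln : ∀ c l', l = c :: l' → l'.length ≤ n := by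
        rintro c l' rfl; simpa using Nat.lt_succ_iff.mp (by simpa using hl)
      cases l with
      | nil => rw [pvScan_nil]; rfl
      | cons c l' =>
          cases hF : pvFindKey (c :: l') pvTable with
          | none =>
              rw [pvScan_cons_none hF,
                pvChainF_no pvTable (fun p hp => hp) c l' (pvFindKey_none_iff.mp hF),
                ih l' (hln c l' rfl)]
          | some p =>
              obtain ⟨k, tgt⟩ := p
              rw [pvScan_cons_some hF]
              simp only [pvFindKey, pvTable] at hF
              split_ifs at hF with h0 h1 h2 h3 h4 h5 <;> simp only [Option.some.injEq, Prod.mk.injEq] at hF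
              · obtain ⟨rfl, rfl⟩ := hF
                exact pvBranchAll n ih [] _ _ _ c l' rfl (by decide) (by decide) (by decide)
                  (hln c l' rfl) (List.isPrefixOf_iff_prefix.mp h0)
              · obtain ⟨rfl, rfl⟩ := hF
                exact pvBranchAll n ih [("approved".toList, "pre-qualified".toList)] _ _ _ c l' rfl
                  (by decide) (by decide) (by decide) (hln c l' rfl) (List.isPrefixOf_iff_prefix.mp h1)
              · obtain ⟨rfl, rfl⟩ := hF
                exact pvBranchAll n ih
                  [("approved".toList, "pre-qualified".toList), ("Approved".toList, "Pre-qualified".toList)]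
                  _ _ _ c l' rfl (by decide) (by decide) (by decide) (hln c l' rfl)
                  (List.isPrefixOf_iff_prefix.mp h2)
              · obtain ⟨rfl, rfl⟩ := hF
                exact pvBranchAll n ih
                  [("approved".toList, "pre-qualified".toList), ("Approved".toList, "Pre-qualified".toList),
                   ("guaranteed".toList, "subject to verification".toList)]
                  _ _ _ c l' rfl (by decide) (by decide) (by decide) (hln c l' rfl)
                  (List.isPrefixOf_iff_prefix.mp h3)
              · obtain ⟨rfl, rfl⟩ := hF
                exact pvBranchAll n ih
                  [("approved".toList, "pre-qualified".toList), ("Approved".toList, "Pre-qualified".toList),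
                   ("guaranteed".toList, "subject to verification".toList),
                   ("Guaranteed".toList, "Subject to verification".toList)]
                  _ _ _ c l' rfl (by decide) (by decide) (by decide) (hln c l' rfl)
                  (List.isPrefixOf_iff_prefix.mp h4)
              · obtain ⟨rfl, rfl⟩ := hF
                exact pvBranchAll n ih
                  [("approved".toList, "pre-qualified".toList), ("Approved".toList, "Pre-qualified".toList),
                   ("guaranteed".toList, "subject to verification".toList),
                   ("Guaranteed".toList, "Subject to verification".toList),
                   ("confirmed".toList, "pending final review".toList)]
                  _ _ _ c l' rfl (by decide) (by decide) (by decide) (hln c l' rfl)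
                  (List.isPrefixOf_iff_prefix.mp h5)

-- A's nested replaces, moved to char lists, are exactly the fueled chain
theorem pvA_chain (l : List Char) :
    PySem.Chars.replace (PySem.Chars.replace (PySem.Chars.replace (PySem.Chars.replace
      (PySem.Chars.replace (PySem.Chars.replace l
        "approved".toList "pre-qualified".toList)
        "Approved".toList "Pre-qualified".toList)
        "guaranteed".toList "subject to verification".toList)
        "Guaranteed".toList "Subject to verification".toList)
        "confirmed".toList "pending final review".toList)
        "Confirmed".toList "Pending final review".toList = pvChainF pvTable l := by
  rw [pvReplace_eq _ "Confirmed".toList _ (by decide),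
    pvReplace_eq _ "confirmed".toList _ (by decide),
    pvReplace_eq _ "Guaranteed".toList _ (by decide),
    pvReplace_eq _ "guaranteed".toList _ (by decide),
    pvReplace_eq _ "Approved".toList _ (by decide),
    pvReplace_eq _ "approved".toList _ (by decide)]
  rfl

-- ===== VERDICT (by name: the statement is the Claim_ definition above) =====
theorem enforce_non_promissory_language_spec : Claim_equal_enforce_non_promissory_language := by
  unfold Claim_equal_enforce_non_promissory_language Spec_enforce_non_promissory_language
  intro text _
  unfold enforce_non_promissory_language enforce_non_promissory_language_alt
  by_cases h : text = ""
  · simp [h]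
  · simp only [h, if_neg, not_false_iff]
    rw [show (PySem.Dict.ofList
        [("approved", "pre-qualified"), ("Approved", "Pre-qualified"),
         ("guaranteed", "subject to verification"), ("Guaranteed", "Subject to verification"),
         ("confirmed", "pending final review"), ("Confirmed", "Pending final review")]
        : PySem.Dict String String).items
      = [("approved", "pre-qualified"), ("Approved", "Pre-qualified"),
         ("guaranteed", "subject to verification"), ("Guaranteed", "Subject to verification"),
         ("confirmed", "pending final review"), ("Confirmed", "Pending final review")] from by decide]
    simp only [List.foldl]
    rw [← pvMain text.toList.length text.toList (le_refl _), ← pvA_chain text.toList]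
    conv_lhs => rw [← String.ofList_toList (s := PySem.Str.replace (PySem.Str.replace (PySem.Str.replace
      (PySem.Str.replace (PySem.Str.replace (PySem.Str.replace text
        "approved" "pre-qualified") "Approved" "Pre-qualified")
        "guaranteed" "subject to verification") "Guaranteed" "Subject to verification")
        "confirmed" "pending final review") "Confirmed" "Pending final review")]
    simp only [PySem.Str.toList_replace]
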